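-- pv_equiv track=rewrite | github.com/cronomantic/ChooseYourDestiny | src/cydc/cydc/cydc_txt_compress.py | _token_counter
-- ===== SOURCE A (Python) =====
-- def _token_counter(strings, min_len, max_len):
--     savings = {}
--     tokens = {}
--     for string in strings:
--         len_string = len(string)
--         if len_string < min_len:
--             continue
--         for pos in range(0, (len_string - min_len) + 1):
--             for len_token in range(min_len, min(max_len, len_string - pos) + 1):
--                 token = string[pos : pos + len_token]
--                 saving = len_token - 1
--                 if token in tokens:
--                     savings[token] += saving
--                     tokens[token] += 1
--                 else:
--                     savings[token] = 0  # No se ahorra ni desperdicia nada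
--                     tokens[token] = 1
--     return (savings, tokens)
-- ===== SOURCE B (Python) =====
-- def _token_counter(strings, min_len, max_len):
--     # Each token is built by extending the previous one with the next character
--     # (no per-token re-slicing, no membership branch, one counter dict);
--     # savings is derived afterwards in closed form: every occurrence after the
--     # first saves len(token) - 1.
--     tokens = {}
--     if min_len <= max_len:
--         for s in strings:
--             n = len(s)
--             for pos in range(0, n - min_len + 1):
--                 tok = s[pos : pos + min_len]
--                 tokens[tok] = tokens.get(tok, 0) + 1
--                 for j in range(pos + min_len, min(pos + max_len, n)):
--                     tok = tok + s[j : j + 1]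
--                     tokens[tok] = tokens.get(tok, 0) + 1
--     savings = {t: (c - 1) * (len(t) - 1) for t, c in tokens.items()}
--     return (savings, tokens)
-- ===== Notes on version B (the rewrite author's own statement) =====
-- stated objective: alternative
-- what changed: B builds each token incrementally by extending the previous token with the next character (inner loop over character positions, one append per step, guarded by min_len<=max_len) instead of independently re-slicing one substring per length, keeps only a single occurrence counter with no membership branch, and derives savings afterwards in closed form as (count-1)*(len(token)-1).
-- outside the precondition, e.g. on _token_counter(['', 'a'], -1, -1): A returns ({'': -8}, {'': 5}), B returns ({'': -4}, {'': 5})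
import Mathlib
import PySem

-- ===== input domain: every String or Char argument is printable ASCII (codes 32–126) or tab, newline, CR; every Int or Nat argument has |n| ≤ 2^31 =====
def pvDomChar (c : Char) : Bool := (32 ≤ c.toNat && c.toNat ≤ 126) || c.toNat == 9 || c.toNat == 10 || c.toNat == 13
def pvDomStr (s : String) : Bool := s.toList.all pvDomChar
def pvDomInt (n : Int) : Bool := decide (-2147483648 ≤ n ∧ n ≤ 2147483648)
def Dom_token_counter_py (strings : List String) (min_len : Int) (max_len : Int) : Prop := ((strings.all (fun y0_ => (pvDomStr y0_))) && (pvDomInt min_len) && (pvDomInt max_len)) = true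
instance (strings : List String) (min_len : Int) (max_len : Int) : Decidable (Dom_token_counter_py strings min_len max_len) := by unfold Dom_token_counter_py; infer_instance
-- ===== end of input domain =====

-- B builds each token by extending the previous one with the next character (no per-token
-- re-slicing, no membership branch, one counter dict); savings is derived afterwards in
-- closed form as (count-1)*(len(token)-1).

-- ===== PORT A =====
def token_counter_py (strings : List String) (min_len : Int) (max_len : Int) :
    (List (String × Int)) × (List (String × Int)) :=
  let st := strings.foldl
    (fun (st : PySem.Dict String Int × PySem.Dict String Int) string =>
      let len_string : Int := PySem.Str.len string
      if len_string < min_len then st          -- continue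
      else
        (PySem.List.pyRange 0 ((len_string - min_len) + 1)).foldl (fun st pos =>
          (PySem.List.pyRange min_len (min max_len (len_string - pos) + 1)).foldl
            (fun st len_token =>
              let token := PySem.Str.slice string (some pos) (some (pos + len_token))
              let saving := len_token - 1
              if st.2.contains token then
                -- savings[token] += saving; tokens[token] += 1 — both keys are present
                -- whenever this branch runs (they are inserted together), so modify with
                -- default 0 is exact here
                (st.1.modify token 0 (· + saving), st.2.modify token 0 (· + 1))
              else
                (st.1.insert token 0, st.2.insert token 1)) st) st)
    (PySem.Dict.empty, PySem.Dict.empty)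
  (st.1.items, st.2.items)

-- ===== PORT B =====
def token_counter_py_alt (strings : List String) (min_len : Int) (max_len : Int) :
    (List (String × Int)) × (List (String × Int)) :=
  let tokens :=
    if min_len ≤ max_len then
      strings.foldl
        (fun (tk : PySem.Dict String Int) s =>
          let n : Int := PySem.Str.len s
          (PySem.List.pyRange 0 (n - min_len + 1)).foldl (fun tk pos =>
            let tok0 := PySem.Str.slice s (some pos) (some (pos + min_len))
            let tk1 := tk.insert tok0 (tk.getD tok0 0 + 1)
            ((PySem.List.pyRange (pos + min_len) (min (pos + max_len) n)).foldl
              (fun (st : PySem.Dict String Int × String) j =>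
                let tok := st.2 ++ PySem.Str.slice s (some j) (some (j + 1))
                (st.1.insert tok (st.1.getD tok 0 + 1), tok))
              (tk1, tok0)).1) tk)
        PySem.Dict.empty
    else PySem.Dict.empty
  (tokens.items.map (fun p => (p.1, (p.2 - 1) * (PySem.Str.len p.1 - 1))), tokens.items)

-- ===== PRECONDITION & SPEC =====
-- Pre_ excludes negative min_len (a minimum token length, outside the natural domain of the
-- parameter), on which A still returns: there Python slices of negative requested length all
-- collapse to '' and A's savings for '' accumulates the requested lengths, not the token's.
def Pre_token_counter_py (strings : List String) (min_len : Int) (max_len : Int) : Prop :=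
  0 ≤ min_len
instance (strings : List String) (min_len : Int) (max_len : Int) : Decidable (Pre_token_counter_py strings min_len max_len) := by unfold Pre_token_counter_py; infer_instance
def pvWitness_token_counter_py : List String × Int × Int := (["abcab", "bc"], 2, 3)
def Spec_token_counter_py (strings : List String) (min_len : Int) (max_len : Int) (out : (List (String × Int)) × (List (String × Int))) : Prop := out = token_counter_py_alt strings min_len max_len
instance (strings : List String) (min_len : Int) (max_len : Int) (out : (List (String × Int)) × (List (String × Int))) : Decidable (Spec_token_counter_py strings min_len max_len out) := by unfold Spec_token_counter_py; infer_instance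

-- ===== CLAIM (what is proved, stated in full; the proofs are below) =====
def Claim_equal_token_counter_py : Prop := ∀ (strings : List String) (min_len : Int) (max_len : Int), Dom_token_counter_py strings min_len max_len → Pre_token_counter_py strings min_len max_len → Spec_token_counter_py strings min_len max_len (token_counter_py strings min_len max_len)

-- ===== LEMMAS AND PROOFS =====

-- savings value a token with a given count contributes in the closed form
def fSave : String × Int → String × Int :=
  fun p => (p.1, (p.2 - 1) * (PySem.Str.len p.1 - 1))

-- invariant tying A's state (savings, tokens) to B's state (the counter)
def GoodSt (x : PySem.Dict String Int × PySem.Dict String Int)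
    (y : PySem.Dict String Int) : Prop :=
  x.2 = y ∧ x.1.items = y.items.map fSave ∧ y.keys.Nodup

lemma len_slice_eq (s : String) (pos L : Int) (h0 : 0 ≤ pos) (hL : 0 ≤ L)
    (hle : pos + L ≤ PySem.Str.len s) :
    PySem.Str.len (PySem.Str.slice s (some pos) (some (pos + L))) = L := by
  simp only [PySem.Str.slice, PySem.Str.len, String.toList_ofList,
    PySem.Chars.slice_eq_listSlice, PySem.List.length_slice, PySem.List.clampIdx] at *
  split_ifs <;> omega

lemma keys_eq_of_items_map (sv y : PySem.Dict String Int)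
    (h : sv.items = y.items.map fSave) : sv.keys = y.keys := by
  simp only [PySem.Dict.keys, h, List.map_map]
  rfl

lemma foldl_rel {α σ τ : Type} (R : σ → τ → Prop) (fA : σ → α → σ) (fB : τ → α → τ)
    (l : List α) (h : ∀ a ∈ l, ∀ x y, R x y → R (fA x a) (fB y a)) :
    ∀ x y, R x y → R (l.foldl fA x) (l.foldl fB y) := by
  induction l with
  | nil => intro x y hxy; simpa using hxy
  | cons a l ih =>
    intro x y hxy
    simp only [List.foldl_cons]
    exact ih (fun b hb => h b (List.mem_cons_of_mem _ hb)) _ _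
      (h a (List.mem_cons_self) x y hxy)

lemma step_good (sv tk y : PySem.Dict String Int) (t : String) (L : Int)
    (hL : PySem.Str.len t = L) (h : GoodSt (sv, tk) y) :
    GoodSt (if tk.contains t then
              (sv.modify t 0 (· + (L - 1)), tk.modify t 0 (· + 1))
            else (sv.insert t 0, tk.insert t 1))
           (y.insert t (y.getD t 0 + 1)) := by
  obtain ⟨hy, hitems, hnd⟩ := h
  simp only at hy hitems
  subst hy
  have hkeys : sv.keys = tk.keys := keys_eq_of_items_map sv tk hitems
  have hcsv : sv.contains t = tk.contains t := by
    rw [PySem.Dict.contains_eq_decide_mem_keys, PySem.Dict.contains_eq_decide_mem_keys, hkeys]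
  by_cases hc : tk.contains t = true
  · simp only [hc, if_true]
    refine ⟨rfl, ?_, ?_⟩
    · simp only [PySem.Dict.modify]
      rw [PySem.Dict.items_insert_of_contains _ _ (hcsv.trans hc),
        PySem.Dict.items_insert_of_contains _ _ hc, hitems, List.map_map, List.map_map]
      apply List.map_congr_left
      intro p hp
      simp only [Function.comp_apply, fSave]
      by_cases hpt : p.1 = t
      · have hbeq : (p.1 == t) = true := by simp [hpt]
        have hgetk : tk.getD t 0 = p.2 := by
          apply PySem.Dict.getD_of_mem_items
          · rw [← hpt]; exact hp
          · exact hnd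
        have hsvnd : sv.keys.Nodup := by rw [hkeys]; exact hnd
        have hgetsv : sv.getD t 0 = (p.2 - 1) * (PySem.Str.len p.1 - 1) := by
          apply PySem.Dict.getD_of_mem_items
          · have : fSave p ∈ sv.items := by rw [hitems]; exact List.mem_map_of_mem hp
            simpa [fSave, hpt] using this
          · exact hsvnd
        simp only [beq_self_eq_true, if_true, hgetk, hgetsv, hpt, hL, Prod.mk.injEq]
        exact ⟨trivial, by ring⟩
      · have hbeq : (p.1 == t) = false := by simp [hpt]
        simp [hbeq]
    · exact PySem.Dict.nodup_keys_insert _ _ _ hnd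
  · have hc' : tk.contains t = false := by simpa using hc
    have hg : tk.getD t 0 = 0 := PySem.Dict.getD_of_not_contains _ _ hc'
    simp only [hc', Bool.false_eq_true, if_false]
    refine ⟨by simp [hg], ?_, PySem.Dict.nodup_keys_insert _ _ _ hnd⟩
    rw [PySem.Dict.items_insert_of_not_contains _ _ (hcsv.trans hc'),
      PySem.Dict.items_insert_of_not_contains _ _ hc', hitems, List.map_append]
    simp [fSave, hg]

-- A's inner range, re-indexed by end position instead of token length
lemma bRange_shift (pos min_len max_len n : Int) :
    PySem.List.pyRange (pos + min_len) (min (pos + max_len) n + 1) =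
      (PySem.List.pyRange min_len (min max_len (n - pos) + 1)).map (fun L => pos + L) := by
  rw [PySem.List.pyRange_one, PySem.List.pyRange_one, List.map_map]
  have hlen : (min (pos + max_len) n + 1 - (pos + min_len)).toNat
      = (min max_len (n - pos) + 1 - min_len).toNat := by omega
  rw [hlen]
  apply List.map_congr_left
  intro k _
  simp only [Function.comp_apply]
  ring

-- A's per-position loop vs the counter over end positions (as in the old per-pos shape)
lemma inner_good (s : String) (min_len max_len pos : Int)
    (hmin : 0 ≤ min_len) (hpos : 0 ≤ pos)
    (x : PySem.Dict String Int × PySem.Dict String Int) (y : PySem.Dict String Int)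
    (h : GoodSt x y) :
    GoodSt
      ((PySem.List.pyRange min_len (min max_len (PySem.Str.len s - pos) + 1)).foldl
        (fun st len_token =>
          let token := PySem.Str.slice s (some pos) (some (pos + len_token))
          let saving := len_token - 1
          if st.2.contains token then
            (st.1.modify token 0 (· + saving), st.2.modify token 0 (· + 1))
          else (st.1.insert token 0, st.2.insert token 1)) x)
      ((PySem.List.pyRange (pos + min_len) (min (pos + max_len) (PySem.Str.len s) + 1)).foldl
        (fun tk e =>
          let tok := PySem.Str.slice s (some pos) (some e)
          tk.insert tok (tk.getD tok 0 + 1)) y) := by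
  rw [bRange_shift, List.foldl_map]
  refine foldl_rel GoodSt _ _ _ ?_ x y h
  intro L hLmem x' y' hxy
  have hL := (PySem.List.mem_pyRange_one.mp hLmem)
  have hlen : PySem.Str.len (PySem.Str.slice s (some pos) (some (pos + L))) = L :=
    len_slice_eq s pos L hpos (by omega) (by omega)
  have := step_good x'.1 x'.2 y' _ L hlen (by cases x'; exact hxy)
  simpa using this

-- one-character slice extension: s[pos:j] + s[j:j+1] = s[pos:j+1]
lemma slice_extend (s : String) (pos j : Int) (h0 : 0 ≤ pos) (hpj : pos ≤ j) :
    PySem.Str.slice s (some pos) (some j) ++ PySem.Str.slice s (some j) (some (j + 1))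
      = PySem.Str.slice s (some pos) (some (j + 1)) := by
  apply String.toList_inj.mp
  rw [String.toList_append]
  simp only [PySem.Str.toList_slice, PySem.Chars.slice_eq_listSlice]
  rw [PySem.List.slice_toNat _ h0 (by omega), PySem.List.slice_toNat _ (by omega) (by omega),
      PySem.List.slice_toNat _ h0 (by omega)]
  have h1 : (j + 1).toNat - pos.toNat = (j.toNat - pos.toNat) + 1 := by omega
  have h2 : (j + 1).toNat - j.toNat = 1 := by omega
  have h3 : pos.toNat + (j.toNat - pos.toNat) = j.toNat := by omega
  rw [h1, h2, List.take_add_one, List.getElem?_drop]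
  conv_rhs => rw [List.take_add_one, List.getElem?_drop, h3]
  simp

-- B's extension loop, unrolled: carrying the growing token is the same as inserting
-- s[pos:j+1] at every j
lemma ext_fold (s : String) (pos m : Int) (h0 : 0 ≤ pos) :
    ∀ (fuel : Nat) (a : Int), pos ≤ a → (m - a).toNat ≤ fuel →
    ∀ (tk : PySem.Dict String Int),
    ((PySem.List.pyRange a m).foldl
        (fun (st : PySem.Dict String Int × String) j =>
          let tok := st.2 ++ PySem.Str.slice s (some j) (some (j + 1))
          (st.1.insert tok (st.1.getD tok 0 + 1), tok))
        (tk, PySem.Str.slice s (some pos) (some a))).1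
      = (PySem.List.pyRange a m).foldl
          (fun tk j =>
            let tok := PySem.Str.slice s (some pos) (some (j + 1))
            tk.insert tok (tk.getD tok 0 + 1)) tk := by
  intro fuel
  induction fuel with
  | zero =>
    intro a ha hf tk
    rw [PySem.List.pyRange_one_eq_nil (by omega)]
    rfl
  | succ f ih =>
    intro a ha hf tk
    by_cases hlt : a < m
    · rw [PySem.List.pyRange_one_cons hlt]
      simp only [List.foldl_cons, slice_extend s pos a h0 ha]
      exact ih (a + 1) (by omega) (by omega) _
    · rw [PySem.List.pyRange_one_eq_nil (by omega)]
      rfl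

lemma pyRange_shift1 (a b : Int) :
    PySem.List.pyRange (a + 1) (b + 1) = (PySem.List.pyRange a b).map (fun j => j + 1) := by
  rw [PySem.List.pyRange_one, PySem.List.pyRange_one, List.map_map]
  have hlen : (b + 1 - (a + 1)).toNat = (b - a).toNat := by omega
  rw [hlen]
  apply List.map_congr_left
  intro k _
  simp only [Function.comp_apply]
  ring

-- B's per-position body equals the fold over end positions that inner_good talks about
lemma B_inner_eq (s : String) (min_len max_len pos : Int)
    (hmin : 0 ≤ min_len) (hmm : min_len ≤ max_len) (hpos : 0 ≤ pos)
    (hub : pos + min_len ≤ PySem.Str.len s) (y : PySem.Dict String Int) :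
    ((PySem.List.pyRange (pos + min_len) (min (pos + max_len) (PySem.Str.len s))).foldl
        (fun (st : PySem.Dict String Int × String) j =>
          let tok := st.2 ++ PySem.Str.slice s (some j) (some (j + 1))
          (st.1.insert tok (st.1.getD tok 0 + 1), tok))
        (y.insert (PySem.Str.slice s (some pos) (some (pos + min_len)))
           (y.getD (PySem.Str.slice s (some pos) (some (pos + min_len))) 0 + 1),
         PySem.Str.slice s (some pos) (some (pos + min_len)))).1
      = (PySem.List.pyRange (pos + min_len) (min (pos + max_len) (PySem.Str.len s) + 1)).foldl
          (fun tk e =>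
            let tok := PySem.Str.slice s (some pos) (some e)
            tk.insert tok (tk.getD tok 0 + 1)) y := by
  have hend : pos + min_len ≤ min (pos + max_len) (PySem.Str.len s) := by omega
  rw [PySem.List.pyRange_one_cons (by omega : pos + min_len < min (pos + max_len) (PySem.Str.len s) + 1)]
  simp only [List.foldl_cons]
  rw [show min (pos + max_len) (PySem.Str.len s) + 1
        = (min (pos + max_len) (PySem.Str.len s)) + 1 from rfl,
      pyRange_shift1 (pos + min_len) (min (pos + max_len) (PySem.Str.len s)), List.foldl_map]
  exact ext_fold s pos (min (pos + max_len) (PySem.Str.len s)) hpos _ (pos + min_len)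
    (by omega) (le_refl _) _

lemma inner_good_new (s : String) (min_len max_len pos : Int)
    (hmin : 0 ≤ min_len) (hmm : min_len ≤ max_len) (hpos : 0 ≤ pos)
    (hub : pos + min_len ≤ PySem.Str.len s)
    (x : PySem.Dict String Int × PySem.Dict String Int) (y : PySem.Dict String Int)
    (h : GoodSt x y) :
    GoodSt
      ((PySem.List.pyRange min_len (min max_len (PySem.Str.len s - pos) + 1)).foldl
        (fun st len_token =>
          let token := PySem.Str.slice s (some pos) (some (pos + len_token))
          let saving := len_token - 1
          if st.2.contains token then
            (st.1.modify token 0 (· + saving), st.2.modify token 0 (· + 1))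
          else (st.1.insert token 0, st.2.insert token 1)) x)
      (((PySem.List.pyRange (pos + min_len) (min (pos + max_len) (PySem.Str.len s))).foldl
        (fun (st : PySem.Dict String Int × String) j =>
          let tok := st.2 ++ PySem.Str.slice s (some j) (some (j + 1))
          (st.1.insert tok (st.1.getD tok 0 + 1), tok))
        (y.insert (PySem.Str.slice s (some pos) (some (pos + min_len)))
           (y.getD (PySem.Str.slice s (some pos) (some (pos + min_len))) 0 + 1),
         PySem.Str.slice s (some pos) (some (pos + min_len)))).1) := by
  rw [B_inner_eq s min_len max_len pos hmin hmm hpos hub y]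
  exact inner_good s min_len max_len pos hmin hpos x y h

lemma string_good_new (s : String) (min_len max_len : Int)
    (hmin : 0 ≤ min_len) (hmm : min_len ≤ max_len)
    (x : PySem.Dict String Int × PySem.Dict String Int) (y : PySem.Dict String Int)
    (h : GoodSt x y) :
    GoodSt
      (if PySem.Str.len s < min_len then x
       else (PySem.List.pyRange 0 ((PySem.Str.len s - min_len) + 1)).foldl (fun st pos =>
          (PySem.List.pyRange min_len (min max_len (PySem.Str.len s - pos) + 1)).foldl
            (fun st len_token =>
              let token := PySem.Str.slice s (some pos) (some (pos + len_token))
              let saving := len_token - 1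
              if st.2.contains token then
                (st.1.modify token 0 (· + saving), st.2.modify token 0 (· + 1))
              else (st.1.insert token 0, st.2.insert token 1)) st) x)
      ((PySem.List.pyRange 0 (PySem.Str.len s - min_len + 1)).foldl (fun tk pos =>
          let tok0 := PySem.Str.slice s (some pos) (some (pos + min_len))
          let tk1 := tk.insert tok0 (tk.getD tok0 0 + 1)
          ((PySem.List.pyRange (pos + min_len) (min (pos + max_len) (PySem.Str.len s))).foldl
            (fun (st : PySem.Dict String Int × String) j =>
              let tok := st.2 ++ PySem.Str.slice s (some j) (some (j + 1))
              (st.1.insert tok (st.1.getD tok 0 + 1), tok))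
            (tk1, tok0)).1) y) := by
  by_cases hg : PySem.Str.len s < min_len
  · rw [if_pos hg, PySem.List.pyRange_one_eq_nil (by omega)]
    simpa using h
  · rw [if_neg hg]
    refine foldl_rel GoodSt _ _ _ ?_ x y h
    intro pos hpmem x' y' hxy
    have hp := (PySem.List.mem_pyRange_one.mp hpmem)
    exact inner_good_new s min_len max_len pos hmin hmm (by omega) (by omega) x' y' hxy

-- when max_len < min_len A's inner loop never runs: the whole fold is the initial state
lemma A_id (strings : List String) (min_len max_len : Int) (hmm : max_len < min_len) :
    strings.foldl
      (fun (st : PySem.Dict String Int × PySem.Dict String Int) string =>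
        let len_string : Int := PySem.Str.len string
        if len_string < min_len then st
        else (PySem.List.pyRange 0 ((len_string - min_len) + 1)).foldl (fun st pos =>
          (PySem.List.pyRange min_len (min max_len (len_string - pos) + 1)).foldl
            (fun st len_token =>
              let token := PySem.Str.slice string (some pos) (some (pos + len_token))
              let saving := len_token - 1
              if st.2.contains token then
                (st.1.modify token 0 (· + saving), st.2.modify token 0 (· + 1))
              else (st.1.insert token 0, st.2.insert token 1)) st) st)
      (PySem.Dict.empty, PySem.Dict.empty)
    = (PySem.Dict.empty, PySem.Dict.empty) := by
  have hstr : ∀ s ∈ strings, ∀ x y, x = y →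
      (fun (st : PySem.Dict String Int × PySem.Dict String Int) string =>
        let len_string : Int := PySem.Str.len string
        if len_string < min_len then st
        else (PySem.List.pyRange 0 ((len_string - min_len) + 1)).foldl (fun st pos =>
          (PySem.List.pyRange min_len (min max_len (len_string - pos) + 1)).foldl
            (fun st len_token =>
              let token := PySem.Str.slice string (some pos) (some (pos + len_token))
              let saving := len_token - 1
              if st.2.contains token then
                (st.1.modify token 0 (· + saving), st.2.modify token 0 (· + 1))
              else (st.1.insert token 0, st.2.insert token 1)) st) st) x s
        = (fun st _ => st) y s := by
    intro s _ x y hxy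
    subst hxy
    by_cases hg : PySem.Str.len s < min_len
    · simp only [if_pos hg]
    · simp only [if_neg hg]
      have hpos : ∀ pos ∈ PySem.List.pyRange 0 ((PySem.Str.len s - min_len) + 1),
          ∀ (u v : PySem.Dict String Int × PySem.Dict String Int), u = v →
          (PySem.List.pyRange min_len (min max_len (PySem.Str.len s - pos) + 1)).foldl
            (fun st len_token =>
              let token := PySem.Str.slice s (some pos) (some (pos + len_token))
              let saving := len_token - 1
              if st.2.contains token then
                (st.1.modify token 0 (· + saving), st.2.modify token 0 (· + 1))
              else (st.1.insert token 0, st.2.insert token 1)) u = v := by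
        intro pos _ u v huv
        subst huv
        rw [PySem.List.pyRange_one_eq_nil (by omega)]
        rfl
      have := foldl_rel (Eq) _ (fun st _ => st) _ hpos x x rfl
      rw [this, List.foldl_fixed]
  have := foldl_rel (Eq) _ (fun st _ => st) strings hstr
    (PySem.Dict.empty, PySem.Dict.empty) (PySem.Dict.empty, PySem.Dict.empty) rfl
  rw [this, List.foldl_fixed]

-- ===== VERDICT (by name: the statement is the Claim_ definition above) =====
theorem token_counter_py_spec : Claim_equal_token_counter_py := by
  intro strings min_len max_len _ hpre
  unfold Spec_token_counter_py token_counter_py token_counter_py_alt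
  by_cases hmm : min_len ≤ max_len
  · simp only [if_pos hmm]
    have h : GoodSt
        (strings.foldl (fun st string =>
          let len_string : Int := PySem.Str.len string
          if len_string < min_len then st
          else (PySem.List.pyRange 0 ((len_string - min_len) + 1)).foldl (fun st pos =>
            (PySem.List.pyRange min_len (min max_len (len_string - pos) + 1)).foldl
              (fun st len_token =>
                let token := PySem.Str.slice string (some pos) (some (pos + len_token))
                let saving := len_token - 1
                if st.2.contains token then
                  (st.1.modify token 0 (· + saving), st.2.modify token 0 (· + 1))
                else (st.1.insert token 0, st.2.insert token 1)) st) st)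
          (PySem.Dict.empty, PySem.Dict.empty))
        (strings.foldl (fun tk s =>
          let n : Int := PySem.Str.len s
          (PySem.List.pyRange 0 (n - min_len + 1)).foldl (fun tk pos =>
            let tok0 := PySem.Str.slice s (some pos) (some (pos + min_len))
            let tk1 := tk.insert tok0 (tk.getD tok0 0 + 1)
            ((PySem.List.pyRange (pos + min_len) (min (pos + max_len) n)).foldl
              (fun (st : PySem.Dict String Int × String) j =>
                let tok := st.2 ++ PySem.Str.slice s (some j) (some (j + 1))
                (st.1.insert tok (st.1.getD tok 0 + 1), tok))
              (tk1, tok0)).1) tk)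
          PySem.Dict.empty) := by
      refine foldl_rel GoodSt _ _ strings ?_ _ _
        ⟨rfl, by simp [PySem.Dict.empty], PySem.Dict.nodup_keys_empty⟩
      intro s _ x y hxy
      exact string_good_new s min_len max_len hpre hmm x y hxy
    obtain ⟨h2, h1, _⟩ := h
    rw [h2, h1]
    rfl
  · simp only [if_neg hmm]
    rw [A_id strings min_len max_len (by omega)]
    rfl
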